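-- pv_equiv track=rewrite | github.com/kazuya0208442/Algorithm | AtCoder_Beginner_Contest/ABC_238/C.py | acuumulation_count
-- ===== SOURCE A (Python) =====
-- mod = 998244353
--
-- def acuumulation_count(x: int) -> int:
--     x = str(x)
--     digit_count = len(x)-1
--     ans = 0
--     for i in range(digit_count):
--         temp = ((10**(i+1) - 10**i) * (10**i + 10**(i+1) - 1)//2) + ((1-10**i)*9*10**i)
--         ans += temp
--         ans %= mod
--     return ans
-- ===== SOURCE B (Python) =====
-- mod = 998244353
--
-- def acuumulation_count(x: int) -> int:
--     n = len(str(x)) - 1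
--     return ((81 * (100 ** n - 1) // 99 + (10 ** n - 1)) // 2) % mod
-- ===== Notes on version B (the rewrite author's own statement) =====
-- stated objective: alternative
-- what changed: Replaced the per-digit loop (each term a triangular-number expression with repeated modular reduction) by a single closed-form geometric-series formula evaluated with two exact integer divisions and one final mod.
import Mathlib
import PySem

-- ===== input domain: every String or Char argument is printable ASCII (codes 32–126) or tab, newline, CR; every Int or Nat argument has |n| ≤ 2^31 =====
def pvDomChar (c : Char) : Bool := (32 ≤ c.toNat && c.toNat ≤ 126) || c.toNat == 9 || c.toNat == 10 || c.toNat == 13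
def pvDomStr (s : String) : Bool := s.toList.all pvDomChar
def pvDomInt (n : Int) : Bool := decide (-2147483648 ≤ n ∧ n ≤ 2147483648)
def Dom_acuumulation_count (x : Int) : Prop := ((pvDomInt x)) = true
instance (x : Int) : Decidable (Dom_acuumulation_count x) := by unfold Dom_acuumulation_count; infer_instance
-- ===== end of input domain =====

-- B replaces A's per-digit loop by the equivalent closed-form geometric-series sum (exact integer divisions, one final mod): a different, loop-free algorithm of similar cost.

-- ===== PORT A =====
def acuumulation_count (x : Int) : Int :=
  let s := PySem.Int.toStr x
  let digit_count : Int := PySem.Str.len s - 1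
  (PySem.List.pyRange 0 digit_count 1).foldl
    (fun ans i =>
      let temp : Int :=
        PySem.Int.floordiv
          ((10 ^ (i + 1).toNat - 10 ^ i.toNat) * (10 ^ i.toNat + 10 ^ (i + 1).toNat - 1)) 2
          + (1 - 10 ^ i.toNat) * 9 * 10 ^ i.toNat
      PySem.Int.mod (ans + temp) 998244353) 0

-- ===== PORT B =====
def acuumulation_count_alt (x : Int) : Int :=
  let n : Int := PySem.Str.len (PySem.Int.toStr x) - 1
  PySem.Int.mod
    (PySem.Int.floordiv
      (PySem.Int.floordiv (81 * (100 ^ n.toNat - 1)) 99 + (10 ^ n.toNat - 1)) 2)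
    998244353

-- ===== PRECONDITION & SPEC =====
def Spec_acuumulation_count (x : Int) (out : Int) : Prop := out = acuumulation_count_alt x
instance (x : Int) (out : Int) : Decidable (Spec_acuumulation_count x out) := by unfold Spec_acuumulation_count; infer_instance

-- ===== CLAIM (what is proved, stated in full; the proofs are below) =====
def Claim_equal_acuumulation_count : Prop := ∀ (x : Int), Dom_acuumulation_count x → Spec_acuumulation_count x (acuumulation_count x)

-- ===== LEMMAS AND PROOFS =====

-- A's loop term at index i, with Nat exponents (the loop only visits i ≥ 0)
def pvTemp (i : Nat) : Int :=
  PySem.Int.floordiv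
    ((10 ^ (i + 1) - 10 ^ i) * (10 ^ i + 10 ^ (i + 1) - 1)) 2
    + (1 - 10 ^ i) * 9 * 10 ^ i

-- exact (un-reduced) partial sum of A's loop terms
def pvSum (m : Nat) : Int := ∑ i ∈ Finset.range m, pvTemp i

theorem pvTemp_two_mul (i : Nat) :
    2 * pvTemp i = 81 * 100 ^ i + 9 * 10 ^ i := by
  unfold pvTemp
  have h10 : (10 : Int) ^ (i + 1) = 10 * 10 ^ i := by ring
  have h100 : (100 : Int) ^ i = 10 ^ i * 10 ^ i := by
    rw [show (100 : Int) = 10 * 10 by norm_num, mul_pow]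
  rw [h10, h100]
  obtain ⟨k0, hk0⟩ := Int.even_mul_succ_self ((10 : Int) ^ i - 1)
  have hk : (10 * (10 : Int) ^ i - 10 ^ i) * (10 ^ i + 10 * 10 ^ i - 1)
      = 2 * (9 * k0 + 45 * ((10 : Int) ^ i * 10 ^ i)) := by
    linear_combination 9 * hk0
  rw [hk, PySem.Int.floordiv_eq_ediv_of_pos (by norm_num),
      Int.mul_ediv_cancel_left _ (by norm_num)]
  linear_combination -9 * hk0

theorem pvSum_two_mul (m : Nat) :
    2 * pvSum m = 81 * (∑ i ∈ Finset.range m, (100 : Int) ^ i)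
               + 9 * (∑ i ∈ Finset.range m, (10 : Int) ^ i) := by
  unfold pvSum
  rw [Finset.mul_sum, Finset.mul_sum, Finset.mul_sum, ← Finset.sum_add_distrib]
  exact Finset.sum_congr rfl fun i _ => by rw [pvTemp_two_mul]

-- A's loop over range(m) equals the reduced exact sum
theorem pv_loop_eq (m : Nat) :
    (PySem.List.pyRange 0 (m : Int) 1).foldl
      (fun ans i =>
        let temp : Int :=
          PySem.Int.floordiv
            ((10 ^ (i + 1).toNat - 10 ^ i.toNat) * (10 ^ i.toNat + 10 ^ (i + 1).toNat - 1)) 2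
            + (1 - 10 ^ i.toNat) * 9 * 10 ^ i.toNat
        PySem.Int.mod (ans + temp) 998244353) 0
    = pvSum m % 998244353 := by
  induction m with
  | zero =>
    have h0 : PySem.List.pyRange 0 ((0 : Nat) : Int) 1 = [] :=
      PySem.List.pyRange_one_eq_nil (by norm_num)
    rw [h0]; simp [pvSum]
  | succ m ih =>
    have hc : ((m + 1 : Nat) : Int) = (m : Int) + 1 := by push_cast; ring
    rw [hc, PySem.List.pyRange_one_succ_right (Int.natCast_nonneg m), List.foldl_append, ih]
    simp only [List.foldl_cons, List.foldl_nil]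
    have ht : (((m : Int)) + 1).toNat = m + 1 := by omega
    have ht2 : ((m : Int)).toNat = m := by omega
    have hs : pvSum (m + 1) = pvSum m + pvTemp m := by
      unfold pvSum; exact Finset.sum_range_succ _ _
    rw [ht, ht2, PySem.Int.mod_eq_emod_of_pos (by norm_num), hs]
    show (pvSum m % 998244353 + pvTemp m) % 998244353
       = (pvSum m + pvTemp m) % 998244353
    omega

-- B's closed form equals the same exact sum
theorem pv_closed_eq (m : Nat) :
    PySem.Int.floordiv
      (PySem.Int.floordiv (81 * ((100 : Int) ^ m - 1)) 99 + ((10 : Int) ^ m - 1)) 2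
    = pvSum m := by
  have hG : (100 : Int) ^ m - 1 = 99 * (∑ i ∈ Finset.range m, (100 : Int) ^ i) := by
    have := geom_sum_mul (100 : Int) m
    linarith [this]
  have hH : (10 : Int) ^ m - 1 = 9 * (∑ i ∈ Finset.range m, (10 : Int) ^ i) := by
    have := geom_sum_mul (10 : Int) m
    linarith [this]
  have h1 : PySem.Int.floordiv (81 * ((100 : Int) ^ m - 1)) 99
      = 81 * (∑ i ∈ Finset.range m, (100 : Int) ^ i) := by
    rw [hG, PySem.Int.floordiv_eq_ediv_of_pos (by norm_num),
        show (81 : Int) * (99 * (∑ i ∈ Finset.range m, (100 : Int) ^ i))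
           = 99 * (81 * (∑ i ∈ Finset.range m, (100 : Int) ^ i)) by ring,
        Int.mul_ediv_cancel_left _ (by norm_num)]
  rw [h1, hH, PySem.Int.floordiv_eq_ediv_of_pos (by norm_num)]
  have h2 : 81 * (∑ i ∈ Finset.range m, (100 : Int) ^ i)
      + 9 * (∑ i ∈ Finset.range m, (10 : Int) ^ i) = 2 * pvSum m := by
    rw [pvSum_two_mul]
  rw [h2, Int.mul_ediv_cancel_left _ (by norm_num)]

theorem pv_toDigits_ne_nil (b n : Nat) : Nat.toDigits b n ≠ [] := by
  intro hnil
  have hlen := congrArg List.length hnil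
  rw [Nat.toDigits] at hlen
  by_cases h : n / b = 0
  · simp [Nat.toDigitsCore, h] at hlen
  · simp only [Nat.toDigitsCore, h, if_false] at hlen
    rw [Nat.toDigitsCore_lens_eq] at hlen
    simp at hlen

-- str(x) is never empty, so digit_count = len(str(x)) - 1 ≥ 0
theorem pv_toChars_ne_nil (x : Int) : PySem.Int.toChars x ≠ [] := by
  unfold PySem.Int.toChars
  split_ifs
  · simp
  · exact pv_toDigits_ne_nil 10 x.toNat

-- ===== VERDICT (by name: the statement is the Claim_ definition above) =====
theorem acuumulation_count_spec : Claim_equal_acuumulation_count := by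
  intro x _
  unfold Spec_acuumulation_count acuumulation_count acuumulation_count_alt
  have hlen : 1 ≤ (PySem.Int.toChars x).length :=
    List.length_pos_of_ne_nil (pv_toChars_ne_nil x)
  obtain ⟨m, hm⟩ : ∃ m : Nat, ((PySem.Int.toChars x).length : Int) - 1 = (m : Int) :=
    ⟨(PySem.Int.toChars x).length - 1, by omega⟩
  simp only [PySem.Str.len_eq, PySem.Int.toList_toStr]
  rw [hm]
  simp only [Int.toNat_natCast]
  rw [pv_loop_eq m, pv_closed_eq m, PySem.Int.mod_eq_emod_of_pos (by norm_num)]
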